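-- pv_equiv track=rewrite | github.com/aimlresearcher/CUI | Final Result/A/Final Papers/SP23-BCS-002.py | backtrack
-- ===== SOURCE A (Python) =====
-- courses = {
--     'Course 1': 30,
--     'Course 2': 50,
--     'Course 3': 40,
--     'Course 4': 20,
--     'Course 5': 60
-- }
--
-- rooms = {
--     'Room 1': 50,
--     'Room 2': 40,
--     'Room 3': 60
-- }
--
-- def backtrack(assignment, unassigned_courses, available_rooms):
--     if not unassigned_courses:
--         return assignment
--
--     course = unassigned_courses[0]
--     students = courses[course]
--
--     for room in available_rooms:
--         capacity = rooms[room]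
--
--         if students <= capacity:
--             assignment[course] = room
--             new_rooms = available_rooms.copy()
--             new_rooms.remove(room)
--
--             result = backtrack(assignment, unassigned_courses[1:], new_rooms)
--             if result:
--                 return result
--
--             del assignment[course]
--
--     return None
-- ===== SOURCE B (Python) =====
-- courses = {
--     'Course 1': 30,
--     'Course 2': 50,
--     'Course 3': 40,
--     'Course 4': 20,
--     'Course 5': 60
-- }
--
-- rooms = {
--     'Room 1': 50,
--     'Room 2': 40,
--     'Room 3': 60
-- }
--
-- def _solve(course_list, room_list):
--     """Pure search: return the list of (course, room) pairs extending the
--     current state, or None if no feasible assignment exists."""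
--     if not course_list:
--         return []
--     first = course_list[0]
--     need = courses[first]
--     for room in room_list:
--         if need <= rooms[room]:
--             remaining = room_list.copy()
--             remaining.remove(room)
--             tail = _solve(course_list[1:], remaining)
--             if tail is not None:
--                 return [(first, room)] + tail
--     return None
--
-- def backtrack(assignment, unassigned_courses, available_rooms):
--     solution = _solve(unassigned_courses, available_rooms)
--     if solution is None:
--         return None
--     for course, room in solution:
--         assignment[course] = room
--     return assignment
-- ===== Notes on version B (the rewrite author's own statement) =====
-- stated objective: alternative
-- what changed: The mutate-dict-and-undo DFS (assign into the shared dict, recurse, `del` on failure, truthiness test on the returned dict) is replaced by a pure search helper that returns the list of new (course, room) pairs or None, with explicit None checks and the shared dict populated once at the end on success.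
-- outside the precondition, e.g. on backtrack({}, ['Course 2', 'Course 5', 'NoSuchCourse'], ['Room 3']): A returns None, B returns None
import Mathlib
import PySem

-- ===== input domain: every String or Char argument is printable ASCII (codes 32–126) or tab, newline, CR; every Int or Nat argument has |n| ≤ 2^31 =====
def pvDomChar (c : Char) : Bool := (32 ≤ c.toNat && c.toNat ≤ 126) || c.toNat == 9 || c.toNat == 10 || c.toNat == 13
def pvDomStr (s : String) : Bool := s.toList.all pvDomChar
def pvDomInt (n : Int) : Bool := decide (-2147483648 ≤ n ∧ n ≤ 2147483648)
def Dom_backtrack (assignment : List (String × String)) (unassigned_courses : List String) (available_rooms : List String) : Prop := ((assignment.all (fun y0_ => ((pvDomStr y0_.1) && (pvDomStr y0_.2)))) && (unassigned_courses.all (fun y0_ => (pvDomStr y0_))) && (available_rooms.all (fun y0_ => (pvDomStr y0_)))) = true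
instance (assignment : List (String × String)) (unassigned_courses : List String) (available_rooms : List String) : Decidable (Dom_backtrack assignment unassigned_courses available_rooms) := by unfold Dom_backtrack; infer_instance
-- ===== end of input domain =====

-- B replaces A's mutate-then-undo DFS on the shared dict by a pure search helper returning the
-- list of new (course, room) pairs (objective: alternative decomposition, not faster).
-- A mutates its `assignment` argument in place; the equivalence proved here is about the RETURN
-- value only (on Pre_ the successful return values coincide exactly, including insertion order).

-- ===== PORT A =====
def coursesDict : PySem.Dict String Int :=
  PySem.Dict.ofList [("Course 1", 30), ("Course 2", 50), ("Course 3", 40), ("Course 4", 20), ("Course 5", 60)]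

def roomsDict : PySem.Dict String Int :=
  PySem.Dict.ofList [("Room 1", 50), ("Room 2", 40), ("Room 3", 60)]

-- A's recursion, with the in-place dict threaded functionally (`del` on failure = continuing
-- with the unmodified dict; exact on Pre_, where the deleted key is always the one just added).
mutual
def backtrackA (assignment : PySem.Dict String String) (unassigned_courses : List String) (available_rooms : List String) : Option (PySem.Dict String String) :=
  match unassigned_courses with
  | [] => some assignment
  | course :: rest =>
    match PySem.Dict.get? coursesDict course with
    | none => none  -- Python: KeyError (excluded by Pre_)
    | some students => tryRoomsA assignment course students rest available_rooms available_rooms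
termination_by (unassigned_courses.length, available_rooms.length + 1)

-- the `for room in available_rooms:` loop; `toTry` is the not-yet-tried suffix
def tryRoomsA (assignment : PySem.Dict String String) (course : String) (students : Int) (rest : List String) (available_rooms : List String) (toTry : List String) : Option (PySem.Dict String String) :=
  match toTry with
  | [] => none
  | room :: more =>
    match PySem.Dict.get? roomsDict room with
    | none => none  -- Python: KeyError (excluded by Pre_)
    | some capacity =>
      if students ≤ capacity then
        match PySem.List.remove? available_rooms room with
        | none => none  -- unreachable: room ∈ available_rooms
        | some new_rooms =>
          match backtrackA (assignment.insert course room) rest new_rooms with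
          | some result =>
            if result.items.isEmpty then tryRoomsA assignment course students rest available_rooms more
            else some result  -- `if result:` truthiness on the dict
          | none => tryRoomsA assignment course students rest available_rooms more
      else tryRoomsA assignment course students rest available_rooms more
termination_by (rest.length + 1, toTry.length)
end

def backtrack (assignment : List (String × String)) (unassigned_courses : List String) (available_rooms : List String) : Option (List (String × String)) :=
  (backtrackA (PySem.Dict.mk assignment) unassigned_courses available_rooms).map PySem.Dict.items

-- ===== PORT B =====
-- Source B's pure `_solve`: the list of NEW (course, room) pairs, or none
mutual
def solveB (course_list : List String) (room_list : List String) : Option (List (String × String)) :=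
  match course_list with
  | [] => some []
  | first :: tl =>
    match PySem.Dict.get? coursesDict first with
    | none => none  -- Python: KeyError (excluded by Pre_)
    | some need => pickRoomB first need tl room_list room_list
termination_by (course_list.length, room_list.length + 1)

def pickRoomB (first : String) (need : Int) (tl : List String) (room_list : List String) (toTry : List String) : Option (List (String × String)) :=
  match toTry with
  | [] => none
  | room :: more =>
    match PySem.Dict.get? roomsDict room with
    | none => none  -- Python: KeyError (excluded by Pre_)
    | some cap =>
      if need ≤ cap then
        match PySem.List.remove? room_list room with
        | none => none  -- unreachable: room ∈ room_list
        | some remaining =>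
          match solveB tl remaining with
          | some tail => some ((first, room) :: tail)
          | none => pickRoomB first need tl room_list more
      else pickRoomB first need tl room_list more
termination_by (tl.length + 1, toTry.length)
end

def backtrack_alt (assignment : List (String × String)) (unassigned_courses : List String) (available_rooms : List String) : Option (List (String × String)) :=
  match solveB unassigned_courses available_rooms with
  | none => none
  | some solution =>
    some ((solution.foldl (fun d p => d.insert p.1 p.2) (PySem.Dict.mk assignment)).items)

-- ===== PRECONDITION & SPEC =====
-- Pre_ excludes the inputs on which Python A can raise KeyError: a room name outside the
-- module's `rooms` table (every room is looked up once any course is unassigned), a course name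
-- outside `courses` that the search reaches, or a double delete on duplicate course names during
-- backtracking.  Besides duplicate-free valid course lists it therefore also admits any input
-- whose valid, duplicate-free course-list prefix ends in a course too large for every available
-- room: there A provably fails before reaching any later anomaly.  A may still return on some
-- excluded inputs (when it happens to succeed or fail before the offending element) — see the
-- cited examples.
def Pre_backtrack (assignment : List (String × String)) (unassigned_courses : List String) (available_rooms : List String) : Prop :=
  (unassigned_courses ≠ [] → ∀ r ∈ available_rooms, (PySem.Dict.get? roomsDict r).isSome) ∧
  ((unassigned_courses.Nodup ∧ ∀ c ∈ unassigned_courses, (PySem.Dict.get? coursesDict c).isSome) ∨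
   ∃ k ∈ List.range unassigned_courses.length,
     (∀ c ∈ unassigned_courses.take (k + 1), (PySem.Dict.get? coursesDict c).isSome) ∧
     (unassigned_courses.take (k + 1)).Nodup ∧
     ∀ r ∈ available_rooms,
       PySem.Dict.getD roomsDict r 0 < PySem.Dict.getD coursesDict (unassigned_courses.getD k "") 0)

instance (assignment : List (String × String)) (unassigned_courses : List String) (available_rooms : List String) : Decidable (Pre_backtrack assignment unassigned_courses available_rooms) := by unfold Pre_backtrack; infer_instance

def pvWitness_backtrack : (List (String × String)) × List String × List String :=
  ([("Course 5", "Room 3")], ["Course 1", "Course 2"], ["Room 1", "Room 2"])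

def Spec_backtrack (assignment : List (String × String)) (unassigned_courses : List String) (available_rooms : List String) (out : Option (List (String × String))) : Prop := out = backtrack_alt assignment unassigned_courses available_rooms
instance (assignment : List (String × String)) (unassigned_courses : List String) (available_rooms : List String) (out : Option (List (String × String))) : Decidable (Spec_backtrack assignment unassigned_courses available_rooms out) := by unfold Spec_backtrack; infer_instance

-- ===== CLAIM (what is proved, stated in full; the proofs are below) =====
def Claim_equal_backtrack : Prop := ∀ (assignment : List (String × String)) (unassigned_courses : List String) (available_rooms : List String), Dom_backtrack assignment unassigned_courses available_rooms → Pre_backtrack assignment unassigned_courses available_rooms → Spec_backtrack assignment unassigned_courses available_rooms (backtrack assignment unassigned_courses available_rooms)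

-- ===== LEMMAS AND PROOFS =====

-- an insert never empties a dict
theorem items_insert_ne_nil (d : PySem.Dict String String) (k v : String) :
    (d.insert k v).items ≠ [] := by
  rw [PySem.Dict.items_insert]
  split_ifs with h
  · have hk : k ∈ d.keys := (PySem.Dict.contains_iff_mem_keys d k).mp h
    have hne : d.items ≠ [] := by
      intro hnil
      simp only [PySem.Dict.keys, hnil, List.map_nil] at hk
      simp at hk
    simpa using hne
  · simp

-- a fold of inserts never empties a dict
theorem items_foldl_insert_ne_nil (l : List (String × String)) (d : PySem.Dict String String)
    (h : d.items ≠ []) :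
    ((l.foldl (fun d p => d.insert p.1 p.2) d).items) ≠ [] := by
  induction l generalizing d with
  | nil => exact h
  | cons p tl ih => exact ih _ (items_insert_ne_nil d p.1 p.2)

-- main simulation: A's dict-threading recursion equals B's pure search followed by the inserts
theorem main_equiv (u : List String) :
    ∀ (d : PySem.Dict String String) (a : List String),
      backtrackA d u a = (solveB u a).map (fun sol => sol.foldl (fun d p => d.insert p.1 p.2) d) := by
  induction u with
  | nil => intro d a; simp [backtrackA, solveB]
  | cons c rest ih =>
    intro d a
    rw [backtrackA, solveB]
    cases hc : PySem.Dict.get? coursesDict c with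
    | none => simp
    | some students =>
      simp only [Option.map]
      have inner : ∀ (toTry : List String) (d : PySem.Dict String String),
          tryRoomsA d c students rest a toTry =
            (pickRoomB c students rest a toTry).map (fun sol => sol.foldl (fun d p => d.insert p.1 p.2) d) := by
        intro toTry
        induction toTry with
        | nil => intro d; simp [tryRoomsA, pickRoomB]
        | cons room more ihm =>
          intro d
          rw [tryRoomsA, pickRoomB]
          cases hr : PySem.Dict.get? roomsDict room with
          | none => simp
          | some cap =>
            simp only []
            by_cases hle : students ≤ cap
            · simp only [if_pos hle]
              cases hrem : PySem.List.remove? a room with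
              | none => simp
              | some new_rooms =>
                simp only []
                rw [ih (d.insert c room) new_rooms]
                cases hs : solveB rest new_rooms with
                | none => simpa using ihm d
                | some tail =>
                  have hne := items_foldl_insert_ne_nil tail (d.insert c room) (items_insert_ne_nil d c room)
                  simp [hne]
            · simp only [if_neg hle]
              simpa using ihm d
      exact inner a d

-- ===== VERDICT (by name: the statement is the Claim_ definition above) =====
theorem backtrack_spec : Claim_equal_backtrack := by
  intro assignment u a _ _
  unfold Spec_backtrack backtrack backtrack_alt
  rw [main_equiv]
  cases solveB u a <;> simp
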